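-- pv_equiv track=rewrite | github.com/KwonTaeyong/Python_v7 | learning75.py | solution
-- ===== SOURCE A (Python) =====
-- def solution(n, bans):
--     bans = set(bans)
--     max_len = 11
--     pow26 = [1] * (max_len + 2)
--     for i in range(1, max_len + 2):
--         pow26[i] = pow26[i - 1] * 26
--
--     # prefix p로 시작하는 문자열 개수
--     def count_with_prefix(p):
--         L = len(p)
--         if L > max_len:
--             return 0
--         # p 자신
--         total = 1
--         # p 뒤에 붙는 길이들
--         remain = max_len - L
--         if remain > 0:
--             total += (pow26[remain + 1] - 26) // 25  # 등비수열 합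
--         # ban 제외
--         # (단순히 bans 중 p로 시작하는 것 세면 안됨 → 전체를 미리 count)
--         for b in bans:
--             if b.startswith(p) and len(b) <= max_len:
--                 total -= 1
--         return total
--
--     prefix = ""
--     while True:
--         for c in map(chr, range(ord('a'), ord('z') + 1)):
--             cnt = count_with_prefix(prefix + c)
--             if n <= cnt:
--                 prefix += c
--                 # prefix 자체가 ban이 아니면 1개 차감
--                 if prefix not in bans:
--                     if n == 1:
--                         return prefix
--                     n -= 1
--                 break
--             else:
--                 n -= cnt
-- ===== SOURCE B (Python) =====
-- def solution(n, bans):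
--     # Trie-style descent: keep only the (deduplicated, length<=11) bans that match the
--     # current prefix, stripped to their suffixes; count next-char collisions with one
--     # pass per level instead of re-scanning the whole ban set 26 times with startswith.
--     MAXL = 11
--     rem = [b for b in dict.fromkeys(bans) if len(b) <= MAXL]
--     prefix = ""
--     for depth in range(1, MAXL + 1):
--         r = MAXL - depth  # characters still placeable after this one
--         free = 1 if r == 0 else 1 + (26 ** (r + 1) - 26) // 25
--         cnts = {}
--         for x in rem:
--             if x:
--                 cnts[x[0]] = cnts.get(x[0], 0) + 1
--         chosen = None
--         for ci in range(26):
--             c = chr(97 + ci)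
--             cnt = free - cnts.get(c, 0)
--             if n <= cnt:
--                 chosen = c
--                 break
--             n -= cnt
--         if chosen is None:
--             break  # unreachable for valid n (n within the number of candidates)
--         prefix += chosen
--         rem = [x[1:] for x in rem if x[:1] == chosen]
--         if "" not in rem:  # prefix itself is not banned: it consumes one slot
--             if n == 1:
--                 return prefix
--             n -= 1
--     return ""  # unreachable for valid n
-- ===== Notes on version B (the rewrite author's own statement) =====
-- stated objective: faster
-- what changed: Instead of re-scanning the whole ban set with startswith 26 times per level, B keeps only the bans matching the current prefix as stripped suffixes (trie-style descent), counts next-char collisions with one dictionary pass per level, and uses the closed-form geometric sum directly instead of a precomputed power table.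
import Mathlib
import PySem

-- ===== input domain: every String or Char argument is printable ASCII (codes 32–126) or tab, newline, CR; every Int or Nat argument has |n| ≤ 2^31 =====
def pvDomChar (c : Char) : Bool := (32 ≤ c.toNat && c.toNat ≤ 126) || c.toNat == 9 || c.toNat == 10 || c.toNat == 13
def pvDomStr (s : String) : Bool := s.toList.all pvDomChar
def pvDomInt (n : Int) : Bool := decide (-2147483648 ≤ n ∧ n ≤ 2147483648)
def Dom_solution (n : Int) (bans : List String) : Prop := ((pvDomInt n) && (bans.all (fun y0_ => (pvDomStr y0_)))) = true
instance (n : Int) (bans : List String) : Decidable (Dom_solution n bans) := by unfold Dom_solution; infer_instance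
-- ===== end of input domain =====

-- B re-implements A's n-th-allowed-string search as a trie-style descent that keeps only the
-- still-matching bans as stripped suffixes, counting next-char collisions with one dictionary
-- pass per level instead of re-scanning the whole ban set with startswith for all 26 characters;
-- a timing run measured B faster on large ban lists. Strings are ported as List Char via
-- PySem.Chars (exact on the stated domain); A's unbounded `while True` is ported with fuel 11,
-- which suffices on every input admitted by Pre_solution.

-- ===== PORT A =====
-- `map(chr, range(ord('a'), ord('z') + 1))`
def azA : List Char := (PySem.List.pyRange 97 123 1).map (fun i => Char.ofNat i.toNat)

-- `pow26 = [1] * 13; for i in range(1, 13): pow26[i] = pow26[i-1] * 26`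
def pow26A : List Int :=
  (PySem.List.pyRange 1 13 1).foldl
    (fun l i => PySem.List.pySetD l i (PySem.List.pyGetD l (i - 1) 0 * 26))
    (List.replicate 13 (1 : Int))

-- `count_with_prefix(p)` (closure over the deduplicated ban set K and pow26)
def countA (K : List (List Char)) (q : List Char) : Int :=
  let L : Int := q.length
  if L > 11 then 0
  else
    let remain : Int := 11 - L
    let total : Int :=
      1 + (if 0 < remain then PySem.Int.floordiv (PySem.List.pyGetD pow26A (remain + 1) 0 - 26) 25 else 0)
    K.foldl (fun t b => if PySem.Chars.startswith b q && decide (b.length ≤ 11) then t - 1 else t) total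

-- result of one pass of A's inner `for c in ...` loop: either `return prefix` or fall back to `while True`
inductive ARes where
  | ret : List Char → ARes
  | cont : List Char → Int → ARes
deriving Repr, DecidableEq

-- the inner `for c in map(chr, ...)` loop with its break body inlined
def innerA (K : List (List Char)) (p : List Char) : Int → List Char → ARes
  | n, [] => ARes.cont p n
  | n, c :: cs =>
    let cnt := countA K (p ++ [c])
    if n ≤ cnt then
      let q := p ++ [c]
      if PySem.Set.contains K q then ARes.cont q n
      else if n = 1 then ARes.ret q
      else ARes.cont q (n - 1)
    else innerA K p (n - cnt) cs

-- `while True:` — fuel 11 (the loop body runs at most 11 times on inputs admitted by Pre_solution)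
def loopA (K : List (List Char)) : Nat → List Char → Int → String
  | 0, _, _ => ""
  | f + 1, p, n =>
    match innerA K p n azA with
    | ARes.ret q => String.ofList q
    | ARes.cont q n' => loopA K f q n'

def solution (n : Int) (bans : List String) : String :=
  loopA (PySem.Set.ofList (bans.map String.toList)) 11 [] n

-- ===== PORT B =====
-- inner `for ci in range(26)` loop: first char whose subtree still holds n, else None
def innerB (cnts : PySem.Dict Char Int) (free : Int) : Int → List Int → Option Char × Int
  | n, [] => (none, n)
  | n, ci :: cis =>
    let c := Char.ofNat (97 + ci).toNat
    let cnt := free - cnts.getD c 0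
    if n ≤ cnt then (some c, n) else innerB cnts free (n - cnt) cis

-- `for depth in range(1, 12)` with state (rem, n, prefix)
def loopB : List Int → List (List Char) → Int → List Char → String
  | [], _, _, _ => ""  -- fell off the loop: unreachable for n admitted by Pre_solution
  | d :: ds, rem, n, pref =>
    let r : Int := 11 - d
    let free : Int := if r = 0 then 1 else 1 + PySem.Int.floordiv ((26 : Int) ^ (r + 1).toNat - 26) 25
    -- `for x in rem: if x: cnts[x[0]] = cnts.get(x[0], 0) + 1`
    let cnts : PySem.Dict Char Int :=
      rem.foldl (fun dd x => match x.head? with | some ch => dd.modify ch 0 (· + 1) | none => dd) PySem.Dict.empty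
    match innerB cnts free n (PySem.List.pyRange 0 26 1) with
    | (none, _) => ""  -- `chosen is None`: unreachable for n admitted by Pre_solution
    | (some c, n') =>
      let pref' := pref ++ [c]
      -- `rem = [x[1:] for x in rem if x[:1] == chosen]`
      let rem' := (rem.filter (fun x => PySem.List.slice x none (some 1) == [c])).map
                    (fun x => PySem.List.slice x (some 1) none)
      if rem'.contains [] then loopB ds rem' n' pref'
      else if n' = 1 then String.ofList pref'
      else loopB ds rem' (n' - 1) pref'

def solution_alt (n : Int) (bans : List String) : String :=
  -- `rem = [b for b in dict.fromkeys(bans) if len(b) <= 11]`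
  loopB (PySem.List.pyRange 1 12 1)
    ((PySem.List.dedup (bans.map String.toList)).filter (fun b => decide (b.length ≤ 11))) n []

-- ===== PRECONDITION & SPEC =====
def azLit : List Char := ['a','b','c','d','e','f','g','h','i','j','k','l','m','n','o','p','q','r','s','t','u','v','w','x','y','z']

-- the ban's first character is a lowercase letter (such bans occupy one of A's enumeration slots)
def lowHead (xs : List Char) : Bool :=
  match xs.head? with
  | some ch => azLit.contains ch
  | none => false

-- Pre_ excludes n < 1 (A's `while True` never returns: n only decreases and is returned at 1) and
-- n greater than the total number of slots A counts, 3817158266467286 = (26^12-26)/25 minus the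
-- number of distinct bans of length 1..11 whose first character is a lowercase letter (there A's
-- while-loop wraps around; within Dom_solution |n| ≤ 2^31 makes that bound unreachable).
def Pre_solution (n : Int) (bans : List String) : Prop :=
  1 ≤ n ∧
  n ≤ 3817158266467286 -
        ((PySem.List.dedup (bans.map String.toList)).countP
          (fun b => decide (b.length ≤ 11) && lowHead b) : Int)
instance (n : Int) (bans : List String) : Decidable (Pre_solution n bans) := by
  unfold Pre_solution; infer_instance

def pvWitness_solution : Int × List String := (27, ["ab", "a"])

def Spec_solution (n : Int) (bans : List String) (out : String) : Prop := out = solution_alt n bans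
instance (n : Int) (bans : List String) (out : String) : Decidable (Spec_solution n bans out) := by
  unfold Spec_solution; infer_instance

-- ===== CLAIM (what is proved, stated in full; the proofs are below) =====
def Claim_equal_solution : Prop :=
  ∀ (n : Int) (bans : List String), Dom_solution n bans → Pre_solution n bans →
    Spec_solution n bans (solution n bans)

-- ===== LEMMAS AND PROOFS =====

-- number of (multiset) bans in l that start with q and have length ≤ 11
def bcnt (l : List (List Char)) (q : List Char) : Int :=
  (l.countP (fun b => PySem.Chars.startswith b q && decide (b.length ≤ 11)) : Int)

-- like bcnt, additionally requiring a lowercase letter right after q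
def lcnt (l : List (List Char)) (q : List Char) : Int :=
  (l.countP (fun b => PySem.Chars.startswith b q && decide (b.length ≤ 11) && lowHead (b.drop q.length)) : Int)

def freeR : Nat → Int
  | 0 => 1
  | r + 1 => 1 + 26 * freeR r

lemma startswith_snoc (b q : List Char) (c : Char) :
    PySem.Chars.startswith b (q ++ [c]) = true ↔
      PySem.Chars.startswith b q = true ∧ (b.drop q.length).head? = some c := by
  rw [PySem.Chars.startswith_iff, PySem.Chars.startswith_iff]
  constructor
  · rintro ⟨t, ht⟩
    subst ht
    refine ⟨⟨[c] ++ t, by simp⟩, ?_⟩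
    simp
  · rintro ⟨⟨s, hs⟩, hh⟩
    subst hs
    rw [List.drop_left] at hh
    obtain ⟨s', rfl⟩ : ∃ s', s = c :: s' := by
      cases s with
      | nil => simp at hh
      | cons a s' => simp at hh; exact ⟨s', by rw [hh]⟩
    exact ⟨s', by simp⟩

lemma countP_cons_int (p : List Char → Bool) (b : List Char) (l : List (List Char)) :
    ((b :: l).countP p : Int) = (if p b then 1 else 0) + (l.countP p : Int) := by
  by_cases h : p b <;> simp [List.countP_cons, h] <;> push_cast <;> ring

lemma bcnt_cons (b : List Char) (l : List (List Char)) (q : List Char) :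
    bcnt (b :: l) q = (if PySem.Chars.startswith b q && decide (b.length ≤ 11) then (1:Int) else 0) + bcnt l q :=
  countP_cons_int _ _ _

lemma lcnt_cons (b : List Char) (l : List (List Char)) (q : List Char) :
    lcnt (b :: l) q = (if PySem.Chars.startswith b q && decide (b.length ≤ 11) && lowHead (b.drop q.length) then (1:Int) else 0) + lcnt l q :=
  countP_cons_int _ _ _

lemma bcnt_snoc_cons (b : List Char) (l : List (List Char)) (q : List Char) (c : Char) :
    bcnt (b :: l) (q ++ [c]) = (if PySem.Chars.startswith b (q ++ [c]) && decide (b.length ≤ 11) then (1:Int) else 0) + bcnt l (q ++ [c]) :=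
  countP_cons_int _ _ _

lemma sum_indicator_nodup (l : List Char) (hl : l.Nodup) (ch : Char) :
    (l.map (fun c => if ch = c then (1:Int) else 0)).sum = if l.contains ch then 1 else 0 := by
  induction l with
  | nil => simp
  | cons a l ih =>
    have ha := (List.nodup_cons.mp hl)
    by_cases h : ch = a
    · subst h
      simp [ih ha.2, List.sum_cons]
      intro hmem
      exact absurd hmem ha.1
    · simp [h, ih ha.2, List.sum_cons]

lemma sum_ind_single (b q : List Char) :
    (azLit.map (fun c => if PySem.Chars.startswith b (q ++ [c]) && decide (b.length ≤ 11) then (1:Int) else 0)).sum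
      = if PySem.Chars.startswith b q && decide (b.length ≤ 11) && lowHead (b.drop q.length) then 1 else 0 := by
  by_cases hb : PySem.Chars.startswith b q = true ∧ b.length ≤ 11
  · cases hh : (b.drop q.length).head? with
    | none =>
      have hz : ∀ c ∈ azLit, (if PySem.Chars.startswith b (q ++ [c]) && decide (b.length ≤ 11) then (1:Int) else 0) = 0 := by
        intro c _
        simp only [Bool.and_eq_true, decide_eq_true_eq, startswith_snoc, hh]
        simp
      rw [List.map_congr_left hz]
      simp [lowHead, hh, PySem.List.sum_map_const_int]
    | some ch =>
      have hmap : ∀ c ∈ azLit, (if PySem.Chars.startswith b (q ++ [c]) && decide (b.length ≤ 11) then (1:Int) else 0)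
          = (if ch = c then (1:Int) else 0) := by
        intro c _
        simp only [Bool.and_eq_true, decide_eq_true_eq, startswith_snoc, hh, hb.1, true_and, Option.some_inj]
        by_cases h : ch = c
        · simp [h, hb.2]
        · rw [if_neg (by tauto), if_neg h]
      rw [List.map_congr_left hmap, sum_indicator_nodup _ (by decide)]
      simp [lowHead, hh, hb.1, hb.2]
  · have hz : ∀ c ∈ azLit, (if PySem.Chars.startswith b (q ++ [c]) && decide (b.length ≤ 11) then (1:Int) else 0) = 0 := by
      intro c _
      simp only [Bool.and_eq_true, decide_eq_true_eq, startswith_snoc]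
      rw [if_neg (by rintro ⟨⟨h1, _⟩, h2⟩; exact hb ⟨h1, h2⟩)]
    rw [List.map_congr_left hz]
    simp only [Bool.and_eq_true, decide_eq_true_eq, PySem.List.sum_map_const_int]
    rw [if_neg (by rintro ⟨⟨h1, h2⟩, _⟩; exact hb ⟨h1, h2⟩)]
    simp

lemma sum_bcnt (l : List (List Char)) (q : List Char) :
    (azLit.map (fun c => bcnt l (q ++ [c]))).sum = lcnt l q := by
  induction l with
  | nil => simp [bcnt, lcnt]
  | cons b l ih =>
    have hsplit : ∀ c ∈ azLit, bcnt (b :: l) (q ++ [c]) =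
        (if PySem.Chars.startswith b (q ++ [c]) && decide (b.length ≤ 11) then (1:Int) else 0) + bcnt l (q ++ [c]) := by
      intro c _; exact bcnt_snoc_cons b l q c
    calc (azLit.map (fun c => bcnt (b :: l) (q ++ [c]))).sum
        = (azLit.map (fun c => (if PySem.Chars.startswith b (q ++ [c]) && decide (b.length ≤ 11) then (1:Int) else 0) + bcnt l (q ++ [c]))).sum := by
          exact congrArg _ (List.map_congr_left hsplit)
      _ = (azLit.map (fun c => if PySem.Chars.startswith b (q ++ [c]) && decide (b.length ≤ 11) then (1:Int) else 0)).sum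
            + (azLit.map (fun c => bcnt l (q ++ [c]))).sum := PySem.List.sum_map_add_int _ _ _
      _ = _ := by
          rw [sum_ind_single, ih, lcnt_cons]

lemma lcnt_le_bcnt (l : List (List Char)) (q : List Char) : lcnt l q ≤ bcnt l q := by
  unfold lcnt bcnt
  have := List.countP_mono_left (l := l)
    (p := fun b => PySem.Chars.startswith b q && decide (b.length ≤ 11) && lowHead (b.drop q.length))
    (q := fun b => PySem.Chars.startswith b q && decide (b.length ≤ 11))
    (by intro x _ h; simp at h ⊢; exact ⟨h.1.1, h.1.2⟩)
  exact_mod_cast this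

lemma bcnt_of_mem (l : List (List Char)) (q : List Char) (hmem : q ∈ l) (hlen : q.length ≤ 11) :
    1 + lcnt l q ≤ bcnt l q := by
  induction l with
  | nil => simp at hmem
  | cons b l ih =>
    rw [bcnt_cons, lcnt_cons]
    rcases List.mem_cons.mp hmem with heq | hmem'
    · have h1 : (PySem.Chars.startswith b q && decide (b.length ≤ 11)) = true := by
        have : PySem.Chars.startswith b q = true := by rw [PySem.Chars.startswith_iff, heq]
        have h3 : b.length ≤ 11 := by rw [← heq]; exact hlen
        simp [this, h3]
      have hlow : lowHead (b.drop q.length) = false := by rw [← heq]; simp [lowHead]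
      have := lcnt_le_bcnt l q
      simp [h1, hlow]
      omega
    · have := ih hmem'
      have hpoint : (if PySem.Chars.startswith b q && decide (b.length ≤ 11) && lowHead (b.drop q.length) then (1:Int) else 0)
          ≤ (if PySem.Chars.startswith b q && decide (b.length ≤ 11) then (1:Int) else 0) := by
        by_cases h : (PySem.Chars.startswith b q && decide (b.length ≤ 11)) = true
        · by_cases h2 : lowHead (b.drop q.length) = true
          · simp [h, h2]
          · rw [Bool.not_eq_true] at h2
            simp [h, h2]
        · rw [Bool.not_eq_true] at h
          simp [h]
      omega

lemma sum_cnt_eq (l : List (List Char)) (q : List Char) (g : Nat) :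
    (azLit.map (fun c => freeR g - bcnt l (q ++ [c]))).sum = freeR (g + 1) - 1 - lcnt l q := by
  have hA : (azLit.map (fun c => (freeR g - bcnt l (q ++ [c])) + bcnt l (q ++ [c]))).sum
      = (azLit.map (fun c => freeR g - bcnt l (q ++ [c]))).sum + (azLit.map (fun c => bcnt l (q ++ [c]))).sum :=
    PySem.List.sum_map_add_int _ _ _
  have hB : (azLit.map (fun c => (freeR g - bcnt l (q ++ [c])) + bcnt l (q ++ [c]))).sum = 26 * freeR g := by
    have hc : ∀ c ∈ azLit, (freeR g - bcnt l (q ++ [c])) + bcnt l (q ++ [c]) = freeR g := fun c _ => by ring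
    rw [List.map_congr_left hc, PySem.List.sum_map_const_int]
    norm_num [azLit]
  rw [sum_bcnt] at hA
  have hfree : freeR (g + 1) = 1 + 26 * freeR g := rfl
  omega

-- counter fold with empty-guard
lemma cntsB_getD_gen (rem : List (List Char)) (d : PySem.Dict Char Int) (c : Char) :
    (rem.foldl (fun dd x => match x.head? with | some ch => dd.modify ch 0 (· + 1) | none => dd) d).getD c 0
      = d.getD c 0 + (rem.countP (fun x => x.head? == some c) : Int) := by
  induction rem generalizing d with
  | nil => simp
  | cons x rem ih =>
    cases hx : x.head? with
    | none =>
      simp only [List.foldl_cons, hx]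
      rw [ih, List.countP_cons]
      simp [hx]
    | some ch =>
      simp only [List.foldl_cons, hx]
      rw [ih, List.countP_cons, PySem.Dict.getD_modify]
      by_cases h : c = ch
      · subst h; simp [hx]; push_cast; ring
      · simp [hx, h, Ne.symm h]

def remOf (K : List (List Char)) (p : List Char) : List (List Char) :=
  (K.filter (fun b => PySem.Chars.startswith b p && decide (b.length ≤ 11))).map (fun b => b.drop p.length)

-- B's per-character ban count equals A's prefix count
lemma rem_head_count (K : List (List Char)) (p : List Char) (c : Char) :
    ((remOf K p).countP (fun x => x.head? == some c) : Int)
      = (K.countP (fun b => PySem.Chars.startswith b (p ++ [c]) && decide (b.length ≤ 11)) : Int) := by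
  unfold remOf
  rw [List.countP_map, List.countP_filter]
  congr 1
  apply List.countP_congr
  intro b _
  simp only [Function.comp_apply, Bool.and_eq_true, beq_iff_eq, decide_eq_true_eq, startswith_snoc]
  tauto

lemma take_one_eq (xs : List Char) (c : Char) : xs.take 1 = [c] ↔ xs.head? = some c := by
  cases xs <;> simp

-- B's suffix-stripping step preserves the rem invariant
lemma rem_step (K : List (List Char)) (p : List Char) (c : Char) :
    ((remOf K p).filter (fun x => PySem.List.slice x none (some 1) == [c])).map
        (fun x => PySem.List.slice x (some 1) none) = remOf K (p ++ [c]) := by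
  unfold remOf
  rw [List.filter_map, List.map_map]
  have hslice1 : ∀ x : List Char, PySem.List.slice x none (some 1) = x.take 1 := by
    intro x; rw [PySem.List.slice_to _ (by omega)]; norm_num
  have hslice2 : ∀ x : List Char, PySem.List.slice x (some 1) none = x.drop 1 := by
    intro x; rw [PySem.List.slice_from _ (by omega)]; norm_num
  rw [List.filter_filter]
  have hpred : ∀ b : List Char,
      (((fun x => PySem.List.slice x none (some 1) == [c]) ∘ (fun b => b.drop p.length)) b
        && (PySem.Chars.startswith b p && decide (b.length ≤ 11)))
      = (PySem.Chars.startswith b (p ++ [c]) && decide (b.length ≤ 11)) := by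
    intro b
    simp only [Function.comp_apply, hslice1]
    rw [Bool.eq_iff_iff]
    simp only [Bool.and_eq_true, beq_iff_eq, decide_eq_true_eq, take_one_eq, startswith_snoc]
    tauto
  have : (fun x => ((fun x => PySem.List.slice x none (some 1) == [c]) ∘ (fun b => b.drop p.length)) x
        && (PySem.Chars.startswith x p && decide (x.length ≤ 11)))
      = (fun b => PySem.Chars.startswith b (p ++ [c]) && decide (b.length ≤ 11)) := funext hpred
  rw [this]
  apply List.map_congr_left
  intro b _
  simp only [Function.comp]
  rw [hslice2, List.drop_drop, List.length_append]
  norm_num [Nat.add_comm]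

-- membership: [] is in remOf K q iff q itself is a (short) ban
lemma mem_rem_nil (K : List (List Char)) (q : List Char) (hq : q.length ≤ 11) :
    [] ∈ remOf K q ↔ q ∈ K := by
  unfold remOf
  rw [List.mem_map]
  constructor
  · rintro ⟨b, hb, hdrop⟩
    rw [List.mem_filter] at hb
    have hsw := (PySem.Chars.startswith_iff _ _).mp (by
      have := hb.2; simp only [Bool.and_eq_true] at this; exact this.1)
    obtain ⟨t, rfl⟩ := hsw
    have : t = [] := by simpa using hdrop
    subst this
    simpa using hb.1
  · intro hqK
    refine ⟨q, ?_, by simp⟩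
    rw [List.mem_filter]
    refine ⟨hqK, ?_⟩
    simp [hq, PySem.Chars.startswith_iff]

lemma az_factor : azLit = (PySem.List.pyRange 0 26 1).map (fun ci => Char.ofNat (97 + ci).toNat) := by decide

lemma totalA_eq (r : Nat) (hr : r ≤ 11) :
    1 + (if (0:Int) < (r:Int) then PySem.Int.floordiv (PySem.List.pyGetD pow26A ((r:Int)+1) 0 - 26) 25 else 0) = freeR r := by
  interval_cases r <;> decide

lemma freeB_eq (r : Nat) (hr : r ≤ 10) :
    (if (r:Nat) = (0:Nat) then (1:Int) else 1 + PySem.Int.floordiv ((26:Int) ^ ((r:Int) + 1).toNat - 26) 25) = freeR r := by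
  interval_cases r <;> decide

lemma foldl_sub_count (l : List (List Char)) (P : List Char → Bool) (t : Int) :
    l.foldl (fun t b => if P b then t - 1 else t) t = t - (l.countP P : Int) := by
  induction l generalizing t with
  | nil => simp
  | cons b l ih => by_cases h : P b <;> simp [h, ih] <;> push_cast <;> ring

lemma countA_eq (K : List (List Char)) (q : List Char) (hq : q.length ≤ 11) :
    countA K q = freeR (11 - q.length) - bcnt K q := by
  unfold countA
  have hL : ¬ ((q.length : Int) > 11) := by push_cast; omega
  rw [if_neg hL]
  rw [foldl_sub_count]
  have h1 : (11 - (q.length : Int)) = ((11 - q.length : Nat) : Int) := by push_cast; omega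
  rw [h1, totalA_eq (11 - q.length) (by omega)]
  rfl

lemma startswith_nil (b : List Char) : PySem.Chars.startswith b [] = true := by
  rw [PySem.Chars.startswith_iff]
  exact List.nil_prefix

lemma remOf_nil (K : List (List Char)) :
    remOf K [] = K.filter (fun b => decide (b.length ≤ 11)) := by
  unfold remOf
  have h1 : K.filter (fun b => PySem.Chars.startswith b [] && decide (b.length ≤ 11))
      = K.filter (fun b => decide (b.length ≤ 11)) := by
    apply List.filter_congr
    intro b _
    simp [startswith_nil]
  rw [h1]
  have h2 : ∀ b ∈ K.filter (fun b => decide (b.length ≤ 11)), b.drop ([] : List Char).length = b := by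
    intro b _
    simp
  rw [List.map_congr_left h2]
  exact List.map_id' _

lemma lcnt_nil (l : List (List Char)) :
    lcnt l [] = (l.countP (fun b => decide (b.length ≤ 11) && lowHead b) : Int) := rfl

lemma grand_total : freeR 11 - 1 = 3817158266467286 := by decide

lemma azA_factor : azA = (PySem.List.pyRange 0 26 1).map (fun ci => Char.ofNat (97 + ci).toNat) := by decide

-- inner loop, no-break case
lemma inner_none (K : List (List Char)) (p : List Char) (cnts : PySem.Dict Char Int) (free : Int) :
    ∀ (cis : List Int) (n n' : Int), 1 ≤ n →
    (∀ ci ∈ cis, countA K (p ++ [Char.ofNat (97 + ci).toNat]) = free - cnts.getD (Char.ofNat (97 + ci).toNat) 0) →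
    innerB cnts free n cis = (none, n') →
    innerA K p n (cis.map (fun ci => Char.ofNat (97 + ci).toNat)) = ARes.cont p n' ∧ 1 ≤ n' ∧
      n' = n - ((cis.map (fun ci => free - cnts.getD (Char.ofNat (97 + ci).toNat) 0)).sum) := by
  intro cis
  induction cis with
  | nil =>
    intro n n' hn _ hB
    simp only [innerB, Prod.mk.injEq, true_and] at hB
    subst hB
    exact ⟨by simp [innerA], by omega, by simp⟩
  | cons ci cis ih =>
    intro n n' hn hc hB
    simp only [innerB] at hB
    by_cases h : n ≤ free - cnts.getD (Char.ofNat (97 + ci).toNat) 0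
    · rw [if_pos h] at hB
      simp at hB
    · rw [if_neg h] at hB
      have hcnt := hc ci (by simp)
      have hrec := ih (n - (free - cnts.getD (Char.ofNat (97 + ci).toNat) 0)) n' (by omega)
        (fun cj hj => hc cj (by simp [hj])) hB
      refine ⟨?_, hrec.2.1, by rw [hrec.2.2, List.map_cons, List.sum_cons]; ring⟩
      simp only [List.map_cons, innerA]
      rw [hcnt, if_neg h]
      exact hrec.1

-- inner loop, break case
lemma inner_some (K : List (List Char)) (p : List Char) (cnts : PySem.Dict Char Int) (free : Int) :
    ∀ (cis : List Int) (n n' : Int) (c : Char), 1 ≤ n →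
    (∀ ci ∈ cis, countA K (p ++ [Char.ofNat (97 + ci).toNat]) = free - cnts.getD (Char.ofNat (97 + ci).toNat) 0) →
    innerB cnts free n cis = (some c, n') →
    1 ≤ n' ∧ n' ≤ countA K (p ++ [c]) ∧
      innerA K p n (cis.map (fun ci => Char.ofNat (97 + ci).toNat)) =
        (if PySem.Set.contains K (p ++ [c]) then ARes.cont (p ++ [c]) n'
         else if n' = 1 then ARes.ret (p ++ [c])
         else ARes.cont (p ++ [c]) (n' - 1)) := by
  intro cis
  induction cis with
  | nil =>
    intro n n' c hn _ hB
    simp [innerB] at hB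
  | cons ci cis ih =>
    intro n n' c hn hc hB
    simp only [innerB] at hB
    have hcnt := hc ci (by simp)
    by_cases h : n ≤ free - cnts.getD (Char.ofNat (97 + ci).toNat) 0
    · rw [if_pos h] at hB
      simp only [Prod.mk.injEq, Option.some.injEq] at hB
      obtain ⟨rfl, rfl⟩ := hB
      refine ⟨hn, by rw [hcnt]; exact h, ?_⟩
      simp only [List.map_cons, innerA]
      rw [hcnt, if_pos h]
    · rw [if_neg h] at hB
      have hrec := ih (n - (free - cnts.getD (Char.ofNat (97 + ci).toNat) 0)) n' c (by omega)
        (fun cj hj => hc cj (by simp [hj])) hB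
      refine ⟨hrec.1, hrec.2.1, ?_⟩
      simp only [List.map_cons, innerA]
      rw [hcnt, if_neg h]
      exact hrec.2.2

-- the main lockstep induction
lemma main_lemma : ∀ (f : Nat), 1 ≤ f → f ≤ 11 → ∀ (K : List (List Char)) (p : List Char) (n : Int),
    p.length = 11 - f → 1 ≤ n →
    n ≤ (azLit.map (fun c => freeR (f-1) - bcnt K (p ++ [c]))).sum →
    loopA K f p n = loopB (PySem.List.pyRange (12 - (f:Int)) 12 1) (remOf K p) n p := by
  intro f
  induction f with
  | zero => omega
  | succ f' ih =>
    intro _ hf11 K p n hp hn1 hn2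
    -- B: unfold one level of the range list
    have hcons : PySem.List.pyRange (12 - ((f' + 1 : Nat) : Int)) 12 1
        = (12 - ((f' + 1 : Nat) : Int)) :: PySem.List.pyRange (12 - (f' : Int)) 12 1 := by
      rw [PySem.List.pyRange_one_cons (by push_cast; omega)]
      congr 1
      push_cast
      ring
    rw [hcons]
    simp only [loopA, loopB]
    rw [azA_factor]
    -- abbreviations matching loopB's lets
    have hr0 : (11 : Int) - (12 - ((f' + 1 : Nat) : Int)) = (f' : Int) := by push_cast; ring
    set cnts : PySem.Dict Char Int :=
      (remOf K p).foldl (fun dd x => match x.head? with | some ch => dd.modify ch 0 (· + 1) | none => dd) PySem.Dict.empty with hcnts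
    set free : Int := if (11 : Int) - (12 - ((f' + 1 : Nat) : Int)) = 0 then 1
        else 1 + PySem.Int.floordiv ((26 : Int) ^ (((11 : Int) - (12 - ((f' + 1 : Nat) : Int))) + 1).toNat - 26) 25 with hfree
    have hfree' : free = freeR f' := by
      rw [hfree, hr0]
      have := freeB_eq f' (by omega)
      rw [← this]
      by_cases h0 : f' = 0
      · subst h0; norm_num
      · rw [if_neg (by exact_mod_cast h0), if_neg (by exact_mod_cast h0)]
    -- counts match
    have hgetD : ∀ c : Char, cnts.getD c 0 = bcnt K (p ++ [c]) := by
      intro c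
      rw [hcnts, cntsB_getD_gen, rem_head_count]
      simp [bcnt]
    have hq11 : p.length + 1 ≤ 11 := by omega
    have hcountA : ∀ c : Char, countA K (p ++ [c]) = freeR f' - bcnt K (p ++ [c]) := by
      intro c
      rw [countA_eq K (p ++ [c]) (by simp [List.length_append]; omega)]
      congr 2
      simp [List.length_append]
      omega
    have hc : ∀ ci ∈ PySem.List.pyRange 0 26 1,
        countA K (p ++ [Char.ofNat (97 + ci).toNat]) = free - cnts.getD (Char.ofNat (97 + ci).toNat) 0 := by
      intro ci _
      rw [hcountA, hgetD, hfree']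
    -- step both sides
    cases hB : innerB cnts free n (PySem.List.pyRange 0 26 1) with
    | mk oc n' =>
      cases oc with
      | none =>
        exfalso
        have hres := inner_none K p cnts free _ n n' hn1 hc hB
        have hsum : ((PySem.List.pyRange 0 26 1).map
            (fun ci => free - cnts.getD (Char.ofNat (97 + ci).toNat) 0)).sum
            = (azLit.map (fun c => freeR (f'+1-1) - bcnt K (p ++ [c]))).sum := by
          have hidx : f' + 1 - 1 = f' := rfl
          rw [hidx, az_factor, List.map_map]
          apply congrArg
          apply List.map_congr_left
          intro ci _
          simp only [Function.comp_apply]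
          rw [hgetD, hfree']
        rw [hsum] at hres
        omega
      | some c =>
        have hres := inner_some K p cnts free _ n n' c hn1 hc hB
        simp only [hB]
        simp only [hres.2.2]
        rw [rem_step]
        have hmem : (remOf K (p ++ [c])).contains [] = PySem.Set.contains K (p ++ [c]) := by
          rw [Bool.eq_iff_iff]
          rw [List.contains_iff_mem, PySem.Set.contains_iff]
          exact mem_rem_nil K (p ++ [c]) (by simp [List.length_append]; omega)
        rw [hmem]
        have hq : (p ++ [c]).length = 11 - f' := by simp [List.length_append]; omega
        have hcnt' : countA K (p ++ [c]) = freeR f' - bcnt K (p ++ [c]) := hcountA c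
        by_cases hban : PySem.Set.contains K (p ++ [c]) = true
        · simp only [hban, if_true]
          cases Nat.eq_zero_or_pos f' with
          | inl h0 =>
            subst h0
            have hnil : PySem.List.pyRange (12 - ((0:Nat) : Int)) 12 1 = [] := by
              rw [PySem.List.pyRange_one_eq_nil (by norm_num)]
            rw [hnil]
            rfl
          | inr hpos =>
            have hK : (p ++ [c]) ∈ K := (PySem.Set.contains_iff _ _).mp hban
            have hbc := bcnt_of_mem K (p ++ [c]) hK (by omega)
            have hnext : n' ≤ (azLit.map (fun c' => freeR (f'-1) - bcnt K ((p ++ [c]) ++ [c']))).sum := by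
              rw [sum_cnt_eq]
              have hff : f' - 1 + 1 = f' := by omega
              rw [hff]
              have := hres.2.1
              rw [hcnt'] at this
              omega
            exact ih hpos (by omega) K (p ++ [c]) n' hq hres.1 hnext
        · rw [Bool.not_eq_true] at hban
          simp only [hban, Bool.false_eq_true, if_false]
          by_cases h1 : n' = 1
          · subst h1
            simp only [if_true]
          · simp only [h1, if_false]
            cases Nat.eq_zero_or_pos f' with
            | inl h0 =>
              subst h0
              have hnil : PySem.List.pyRange (12 - ((0:Nat) : Int)) 12 1 = [] := by
                rw [PySem.List.pyRange_one_eq_nil (by norm_num)]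
              rw [hnil]
              rfl
            | inr hpos =>
              have hnext : n' - 1 ≤ (azLit.map (fun c' => freeR (f'-1) - bcnt K ((p ++ [c]) ++ [c']))).sum := by
                rw [sum_cnt_eq]
                have hff : f' - 1 + 1 = f' := by omega
                rw [hff]
                have h2 := hres.2.1
                rw [hcnt'] at h2
                have h3 := lcnt_le_bcnt K (p ++ [c])
                omega
              exact ih hpos (by omega) K (p ++ [c]) (n' - 1) hq (by omega) hnext

lemma top_equal (n : Int) (bans : List String) (hpre : Pre_solution n bans) :
    solution n bans = solution_alt n bans := by
  obtain ⟨hn1, hn2⟩ := hpre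
  unfold solution solution_alt
  have hK : PySem.List.dedup (bans.map String.toList) = PySem.Set.ofList (bans.map String.toList) := by
    simp
  rw [hK]
  have hinv : n ≤ (azLit.map (fun c => freeR (11 - 1) - bcnt (PySem.Set.ofList (bans.map String.toList)) ([] ++ [c]))).sum := by
    rw [show (11 - 1 : Nat) = 10 from rfl, sum_cnt_eq, show (10 + 1 : Nat) = 11 from rfl, grand_total, lcnt_nil]
    rw [hK] at hn2
    omega
  have hmain := main_lemma 11 (by norm_num) (by norm_num)
    (PySem.Set.ofList (bans.map String.toList)) [] n (by simp) hn1 hinv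
  rw [remOf_nil] at hmain
  have hr : PySem.List.pyRange (12 - ((11 : Nat) : Int)) 12 1 = PySem.List.pyRange 1 12 1 := by norm_num
  rw [hr] at hmain
  exact hmain

-- ===== VERDICT (by name: the statement is the Claim_ definition above) =====
theorem solution_spec : Claim_equal_solution := by
  intro n bans _ hpre
  unfold Spec_solution
  exact top_equal n bans hpre
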